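-- pv_equiv track=rewrite | github.com/sec-js/craigslistpcanalytics | datacompare.py | outlierdelete
-- ===== SOURCE A (Python) =====
-- def outlierdelete(dict):
-- 	updatedict = {}
-- 	voidlist = ["&amp", "XBOX", "&#39", "Blaster", "quot", "Dance", "Mortal", "140+", "Xbox", "Ornata", "WW2", "Boost", "Flight", "Shifter", "Ematic", "Battlefield", "Game walk", "Cabinet"]
-- 	check = 1
-- 	for key in dict.keys():
-- 		for word in voidlist:
-- 			if word in dict.get(key)[0]:
-- 				check = 0
-- 		if check == 1:
-- 			updatedict[key] = dict.get(key)
-- 		check = 1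
--
-- 	return updatedict
-- ===== SOURCE B (Python) =====
-- VOIDLIST = ["&amp", "XBOX", "&#39", "Blaster", "quot", "Dance", "Mortal", "140+", "Xbox", "Ornata", "WW2", "Boost", "Flight", "Shifter", "Ematic", "Battlefield", "Game walk", "Cabinet"]
--
--
-- def _blocked(s):
--     # single left-to-right scan: at each position check whether any
--     # blacklisted word starts there (position-major, early exit)
--     for i in range(len(s)):
--         for w in VOIDLIST:
--             if s.startswith(w, i):
--                 return True
--     return False
--
--
-- def outlierdelete(dict):
--     return {k: v for k, v in dict.items() if not _blocked(v[0])}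
-- ===== Notes on version B (the rewrite author's own statement) =====
-- stated objective: alternative
-- what changed: Replaces A's word-major flag loop (for each key, test each of the 18 words with 'in', tracking a check flag, inserting into a fresh dict) by a dict comprehension filtering on a position-major scanner that walks each string once left to right and at every position asks whether any blacklisted word starts there, with early exit.
-- outside the precondition, e.g. on outlierdelete({'a': []}): A raises IndexError, B raises IndexError
import Mathlib
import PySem

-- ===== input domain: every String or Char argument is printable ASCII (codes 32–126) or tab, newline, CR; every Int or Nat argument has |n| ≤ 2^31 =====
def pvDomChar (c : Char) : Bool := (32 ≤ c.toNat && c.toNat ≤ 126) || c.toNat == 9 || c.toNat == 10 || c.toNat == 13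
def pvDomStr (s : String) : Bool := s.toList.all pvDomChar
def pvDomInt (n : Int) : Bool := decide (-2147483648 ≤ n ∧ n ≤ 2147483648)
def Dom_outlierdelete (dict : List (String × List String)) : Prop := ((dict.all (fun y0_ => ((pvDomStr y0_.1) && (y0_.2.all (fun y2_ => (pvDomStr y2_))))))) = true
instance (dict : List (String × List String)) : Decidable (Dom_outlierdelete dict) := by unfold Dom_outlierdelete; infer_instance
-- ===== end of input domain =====

-- B replaces A's word-major 'in'-test flag loop by a dict comprehension over a
-- position-major single left-to-right scanner (alternative structure, same cost).


-- ===== PORT A =====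
-- voidlist (the same constant list both Pythons carry)
def pvVoid : List String := ["&amp", "XBOX", "&#39", "Blaster", "quot", "Dance", "Mortal", "140+", "Xbox", "Ornata", "WW2", "Boost", "Flight", "Shifter", "Ematic", "Battlefield", "Game walk", "Cabinet"]

def outlierdelete (dict : List (String × List String)) : List (String × List String) :=
  let d : PySem.Dict String (List String) := PySem.Dict.mk dict
  -- updatedict starts as a fresh dict; check = 1; for key in dict.keys(): …
  let fin := (PySem.Dict.keys d).foldl
    (fun (st : PySem.Dict String (List String) × Int) key =>
      let v := PySem.Dict.getD d key []            -- dict.get(key); a key from keys() is always present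
      let s := (PySem.List.pyGet? v 0).getD ""     -- dict.get(key)[0]; none = IndexError, excluded by Pre_
      let check := pvVoid.foldl (fun c word => if PySem.Str.isIn word s then (0 : Int) else c) st.2
      (if check == 1 then st.1.insert key v else st.1, (1 : Int)))
    (PySem.Dict.empty, (1 : Int))
  fin.1.items

-- ===== PORT B =====
-- s.startswith(w, i) with i drawn from range(len(s)) (so 0 ≤ i) equals s[i:].startswith(w): exact here
def pvBlocked (s : String) : Bool :=
  (List.range s.toList.length).any (fun i =>   -- for i in range(len(s))
    pvVoid.any (fun w => PySem.Chars.startswith (s.toList.drop i) w.toList))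

def outlierdelete_alt (dict : List (String × List String)) : List (String × List String) :=
  dict.filter (fun kv => !pvBlocked ((PySem.List.pyGet? kv.2 0).getD ""))  -- {k: v for k, v in dict.items() if not _blocked(v[0])}

-- ===== PRECONDITION & SPEC =====
-- Pre_ excludes (a) entries whose value list holds no element, on which A raises IndexError at dict.get(key)[0],
-- and (b) duplicate keys, which cannot occur in a Python dict (the assoc-list image of such an input is not a dict).
def Pre_outlierdelete (dict : List (String × List String)) : Prop :=
  (dict.map Prod.fst).Nodup ∧ ∀ p ∈ dict, p.2 ≠ []
instance (dict : List (String × List String)) : Decidable (Pre_outlierdelete dict) := by unfold Pre_outlierdelete; infer_instance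

def pvWitness_outlierdelete : (List (String × List String)) := [("a", ["good deal"]), ("b", ["XBOX one"])]

def Spec_outlierdelete (dict : List (String × List String)) (out : List (String × List String)) : Prop := out = outlierdelete_alt dict
instance (dict : List (String × List String)) (out : List (String × List String)) : Decidable (Spec_outlierdelete dict out) := by unfold Spec_outlierdelete; infer_instance

-- ===== CLAIM (what is proved, stated in full; the proofs are below) =====
def Claim_equal_outlierdelete : Prop := ∀ (dict : List (String × List String)), Dom_outlierdelete dict → Pre_outlierdelete dict → Spec_outlierdelete dict (outlierdelete dict)

-- ===== LEMMAS AND PROOFS =====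

-- the keep-predicate both sides decide per key
def pvKeep (d : PySem.Dict String (List String)) (key : String) : Bool :=
  !pvBlocked ((PySem.List.pyGet? (PySem.Dict.getD d key []) 0).getD "")

-- A's inner flag loop computes "0 if some word occurs, else the incoming flag"
theorem check_fold (l : List String) (s : String) :
    ∀ c : Int, l.foldl (fun c w => if PySem.Str.isIn w s then (0 : Int) else c) c
      = if l.any (fun w => PySem.Str.isIn w s) then 0 else c := by
  induction l with
  | nil => intro c; simp
  | cons w l ih =>
    intro c
    rw [List.foldl_cons, ih, List.any_cons]
    cases hw : PySem.Str.isIn w s <;> cases hl : (l.any fun w => PySem.Str.isIn w s) <;> simp_all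

-- B's position-major scanner finds exactly the strings containing some blacklisted word
theorem blocked_eq_any (s : String) :
    pvBlocked s = pvVoid.any (fun w => PySem.Str.isIn w s) := by
  have hne : ∀ w ∈ pvVoid, w.toList ≠ [] := by decide
  rcases hb : pvBlocked s with _ | _
  · rcases ha : pvVoid.any (fun w => PySem.Str.isIn w s) with _ | _
    · rfl
    · exfalso
      rw [List.any_eq_true] at ha
      obtain ⟨w, hw, hin⟩ := ha
      rw [PySem.Str.isIn_iff_infix] at hin
      have := (PySem.Chars.exists_prefix_drop_iff_isIn (s := s.toList) (sub := w.toList)).2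
      rw [PySem.Chars.isIn_iff_infix] at this
      obtain ⟨j, hj⟩ := this hin
      have hjlt : j < s.toList.length := by
        by_contra h
        rw [List.drop_eq_nil_of_le (le_of_not_gt h)] at hj
        exact hne w hw (List.prefix_nil.mp hj)
      have : pvBlocked s = true := by
        unfold pvBlocked
        rw [List.any_eq_true]
        refine ⟨j, ?_, ?_⟩
        · simpa using hjlt
        · rw [List.any_eq_true]
          exact ⟨w, hw, (PySem.Chars.startswith_iff _ _).2 hj⟩
      rw [hb] at this; exact Bool.false_ne_true this
  · unfold pvBlocked at hb
    rw [List.any_eq_true] at hb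
    obtain ⟨i, _, hi⟩ := hb
    rw [List.any_eq_true] at hi
    obtain ⟨w, hw, hpre⟩ := hi
    rw [PySem.Chars.startswith_iff] at hpre
    symm
    rw [List.any_eq_true]
    refine ⟨w, hw, ?_⟩
    rw [PySem.Str.isIn_iff_infix]
    exact hpre.isInfix.trans (List.drop_suffix i s.toList).isInfix

theorem fold_insert_items :
    ∀ (l : List (String × List String)) (d : PySem.Dict String (List String))
      (acc : PySem.Dict String (List String)),
      (l.map Prod.fst).Nodup →
      (∀ p ∈ l, PySem.Dict.get? d p.1 = some p.2) →
      (∀ p ∈ l, acc.contains p.1 = false) →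
      ((l.map Prod.fst).foldl
          (fun a key => if pvKeep d key then a.insert key (PySem.Dict.getD d key []) else a) acc).items
        = acc.items ++ l.filter (fun p => pvKeep d p.1) := by
  intro l d
  induction l with
  | nil => intro acc _ _ _; simp
  | cons p l ih =>
    intro acc hnd hget hfresh
    have hget_p : PySem.Dict.get? d p.1 = some p.2 := hget p (List.mem_cons_self ..)
    have hgetD : PySem.Dict.getD d p.1 [] = p.2 :=
      PySem.Dict.getD_of_get?_eq_some d [] hget_p
    have hfp : acc.contains p.1 = false := hfresh p (List.mem_cons_self ..)
    have hnd2 : p.1 ∉ l.map Prod.fst ∧ (l.map Prod.fst).Nodup := by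
      rw [List.map_cons] at hnd; exact List.nodup_cons.mp hnd
    have hnotmem : p.1 ∉ l.map Prod.fst := hnd2.1
    have hfresh' : ∀ q ∈ l,
        (if pvKeep d p.1 then acc.insert p.1 (PySem.Dict.getD d p.1 []) else acc).contains q.1 = false := by
      intro q hq
      have hne : q.1 ≠ p.1 := fun h => hnotmem (h ▸ List.mem_map_of_mem hq)
      by_cases hk : pvKeep d p.1 = true
      · rw [if_pos hk, PySem.Dict.contains_insert]
        simp [hne, hfresh q (List.mem_cons_of_mem _ hq)]
      · rw [if_neg hk]; exact hfresh q (List.mem_cons_of_mem _ hq)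
    rw [List.map_cons, List.foldl_cons,
        ih _ hnd2.2
          (fun q hq => hget q (List.mem_cons_of_mem _ hq)) hfresh']
    by_cases hk : pvKeep d p.1 = true
    · rw [if_pos hk, hgetD, PySem.Dict.items_insert_of_not_contains _ _ hfp]
      simp [hk]
    · rw [if_neg hk]
      simp [hk]

-- A's per-key flag test "check == 1" is exactly B's keep-predicate
theorem check_eq_keep (d : PySem.Dict String (List String)) (key : String) :
    ((pvVoid.foldl
        (fun c word => if PySem.Str.isIn word ((PySem.List.pyGet? (PySem.Dict.getD d key []) 0).getD "") then (0 : Int) else c) 1) == (1 : Int))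
      = pvKeep d key := by
  rw [check_fold]
  unfold pvKeep
  rw [blocked_eq_any]
  cases h : pvVoid.any (fun w => PySem.Str.isIn w ((PySem.List.pyGet? (PySem.Dict.getD d key []) 0).getD "")) <;> simp

-- A's fold (carrying the always-reset check flag) collapses to the conditional-insert fold
theorem pair_fold (ks : List String) (d : PySem.Dict String (List String)) :
    ∀ acc : PySem.Dict String (List String),
      ks.foldl
        (fun (st : PySem.Dict String (List String) × Int) key =>
          let v := PySem.Dict.getD d key []
          let s := (PySem.List.pyGet? v 0).getD ""
          let check := pvVoid.foldl (fun c word => if PySem.Str.isIn word s then (0 : Int) else c) st.2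
          (if check == 1 then st.1.insert key v else st.1, (1 : Int)))
        (acc, (1 : Int))
      = (ks.foldl (fun a key => if pvKeep d key then a.insert key (PySem.Dict.getD d key []) else a) acc, 1) := by
  induction ks with
  | nil => intro acc; rfl
  | cons k ks ih =>
    intro acc
    rw [List.foldl_cons, List.foldl_cons]
    simp only [check_eq_keep d k]
    exact ih _

-- ===== VERDICT (by name: the statement is the Claim_ definition above) =====
theorem outlierdelete_spec : Claim_equal_outlierdelete := by
  intro dict _ hpre
  obtain ⟨hnd, _⟩ := hpre
  unfold Spec_outlierdelete outlierdelete outlierdelete_alt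
  have hkeys : PySem.Dict.keys (PySem.Dict.mk dict) = dict.map Prod.fst := rfl
  have hndk : (PySem.Dict.mk dict).keys.Nodup := by rw [hkeys]; exact hnd
  have hget : ∀ p ∈ dict, PySem.Dict.get? (PySem.Dict.mk dict) p.1 = some p.2 := by
    intro p hp
    exact PySem.Dict.get?_of_mem_items _ hp hndk
  simp only [hkeys, pair_fold]
  rw [fold_insert_items dict (PySem.Dict.mk dict) PySem.Dict.empty hnd hget
        (fun p _ => PySem.Dict.contains_empty _)]
  rw [show (PySem.Dict.empty : PySem.Dict String (List String)).items = [] from rfl, List.nil_append]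
  apply List.filter_congr
  intro p hp
  unfold pvKeep
  rw [PySem.Dict.getD_of_get?_eq_some _ [] (hget p hp)]
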